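-- pv_equiv track=rewrite | github.com/seohyeon1578/Baekjoon | etc/프로그래머스/N진수 게임.py | solution
-- ===== SOURCE A (Python) =====
-- def solution(n, t, m, p):
--     answer = ''
--     array = []
--     cnt = 0
--
--     for i in range(0, t * m):
--         array.append(func(i,n))
--     s = ''.join(array)
--
--     for i in range(p - 1, len(s), m):
--         if cnt >= t:
--             break
--         answer += s[i]
--         cnt += 1
--
--     return answer
--
-- def func(n, base):
--     T = "0123456789ABCDEF"
--     q, r = divmod(n, base)
--
--     return func(q, base) + T[r] if q else T[r]
-- ===== SOURCE B (Python) =====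
-- def solution(n, t, m, p):
--     T = "0123456789ABCDEF"
--     answer = []
--     pos = 0
--     for i in range(t * m):
--         if len(answer) >= t:
--             break
--         x = i
--         digits = []
--         while True:
--             digits.append(T[x % n])
--             x //= n
--             if x == 0:
--                 break
--         for d in reversed(digits):
--             if pos >= p - 1 and (pos - (p - 1)) % m == 0 and len(answer) < t:
--                 answer.append(d)
--             pos += 1
--     return ''.join(answer)
-- ===== Notes on version B (the rewrite author's own statement) =====
-- stated objective: alternative
-- what changed: One streaming pass that fuses generation and selection: each i is converted to base n by an iterative divmod loop (replacing A's recursive func), its digits are emitted past a running global position counter, and a digit is kept exactly when its position is >= p-1 and congruent to p-1 mod m, stopping once t digits are kept - no t*m-entry list and no joined string are ever built.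
-- outside the precondition, e.g. on solution(2, 2, 2, 0): A returns '11', B returns '10'; on solution(4, 1, 2, 0): A returns '1', B returns '1'
import Mathlib
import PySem

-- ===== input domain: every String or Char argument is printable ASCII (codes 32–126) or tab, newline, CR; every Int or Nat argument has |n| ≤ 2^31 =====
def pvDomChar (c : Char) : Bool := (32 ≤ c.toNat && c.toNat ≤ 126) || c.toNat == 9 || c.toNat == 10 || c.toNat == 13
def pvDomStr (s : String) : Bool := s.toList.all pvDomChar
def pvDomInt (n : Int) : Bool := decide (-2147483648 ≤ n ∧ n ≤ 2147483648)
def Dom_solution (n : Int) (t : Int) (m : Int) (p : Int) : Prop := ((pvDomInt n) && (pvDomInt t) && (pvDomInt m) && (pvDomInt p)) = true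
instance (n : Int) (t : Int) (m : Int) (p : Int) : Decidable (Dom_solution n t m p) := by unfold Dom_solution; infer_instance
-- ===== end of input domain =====

-- B replaces A's two-pass build-all-digits-then-stride algorithm by one streaming pass (iterative
-- base conversion, selection fused into generation with an early stop); same cost class, not claimed faster.
-- ===== PORT A =====

-- T = "0123456789ABCDEF" (as the digit list both sides index into)
def pvT : List Char := ['0','1','2','3','4','5','6','7','8','9','A','B','C','D','E','F']

-- func(n, base): recursive most-significant-first conversion; fuel bounds Python's recursion
-- (exhaustion = RecursionError, and T[r] out of range = IndexError: both only outside Pre_).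
def funcA : Nat → Int → Int → List Char
  | 0, _, _ => []
  | fuel+1, nn, base =>
    let q := PySem.Int.floordiv nn base
    let r := PySem.Int.mod nn base
    if q ≠ 0 then funcA fuel q base ++ [PySem.List.pyGetD pvT r '?']
    else [PySem.List.pyGetD pvT r '?']

def solution (n : Int) (t : Int) (m : Int) (p : Int) : String :=
  let array : List (List Char) :=
    (PySem.List.pyRange 0 (t*m) 1).foldl (fun acc i => acc ++ [funcA (i.natAbs+1) i n]) []
  let s : List Char := array.flatten
  let r :=
    (PySem.List.pyRange (p-1) (s.length : Int) m).foldl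
      (fun (st : List Char × Int) i =>
        if t ≤ st.2 then st
        else (st.1 ++ [PySem.List.pyGetD s i '?'], st.2 + 1)) ([], 0)
  String.mk r.1

-- ===== PORT B =====

-- the inner digit loop of Source B: collect T[x % n] least-significant first, x //= n, until x == 0
def digitsB : Nat → Int → Int → List Char
  | 0, _, _ => []
  | fuel+1, x, nn =>
    let d := PySem.List.pyGetD pvT (PySem.Int.mod x nn) '?'
    let x' := PySem.Int.floordiv x nn
    if x' = 0 then [d] else d :: digitsB fuel x' nn

-- the per-emitted-digit step of Source B (running state: picked answer, global position counter)
def pvStepB (t m p : Int) (st2 : List Char × Int) (d : Char) : List Char × Int :=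
  (if p - 1 ≤ st2.2 ∧ PySem.Int.mod (st2.2 - (p-1)) m = 0 ∧ (st2.1.length : Int) < t
   then st2.1 ++ [d] else st2.1, st2.2 + 1)

def solution_alt (n : Int) (t : Int) (m : Int) (p : Int) : String :=
  let r :=
    (PySem.List.pyRange 0 (t*m) 1).foldl
      (fun (st : List Char × Int) i =>
        if t ≤ (st.1.length : Int) then st
        else ((digitsB (i.natAbs+1) i n).reverse).foldl (pvStepB t m p) st) ([], 0)
  String.mk r.1

-- ===== PRECONDITION & SPEC =====
-- Pre_ keeps every input shape on which Python A returns normally and whose value the claim covers: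
-- a base whose digits stay inside the 16-entry table for all generated values (2..16, or any base
-- while n > 16 with t*m <= 16, -17..-2, or no/one generated value), and t <= 0 (A breaks at once),
-- or the real domain t,m >= 1 with player index p >= 1, or m < 0 with p <= 1 (empty stride).
-- It excludes exactly (a) the inputs where A raises (RecursionError/ZeroDivisionError/IndexError/
-- ValueError: base 1/0/<=-18 with more than one value, base > 16 reaching a 17th value, m = 0 with
-- t >= 1, or start index below -len) and (b) the out-of-domain corner p <= 0 with t,m >= 1, where
-- A's negative start index wraps to the end of the digit string — a value no caller specifies
-- (B picks the digits at the nonnegative positions congruent to p-1 mod m there instead).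
def Pre_solution (n : Int) (t : Int) (m : Int) (p : Int) : Prop :=
  ((2 ≤ n ∧ (n ≤ 16 ∨ t*m ≤ 16)) ∨ (-17 ≤ n ∧ n ≤ -2) ∨ t*m ≤ 0 ∨ (n ≠ 0 ∧ t*m = 1)) ∧
  ((t ≤ 0 ∧ m ≠ 0) ∨ (1 ≤ t ∧ 1 ≤ m ∧ 1 ≤ p) ∨ (1 ≤ t ∧ m ≤ -1 ∧ p ≤ 1))
instance (n : Int) (t : Int) (m : Int) (p : Int) : Decidable (Pre_solution n t m p) := by
  unfold Pre_solution; infer_instance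

def pvWitness_solution : Int × Int × Int × Int := (2, 3, 2, 1)

def Spec_solution (n : Int) (t : Int) (m : Int) (p : Int) (out : String) : Prop :=
  out = solution_alt n t m p
instance (n : Int) (t : Int) (m : Int) (p : Int) (out : String) : Decidable (Spec_solution n t m p out) := by
  unfold Spec_solution; infer_instance

-- ===== CLAIM (what is proved, stated in full; the proofs are below) =====
def Claim_equal_solution : Prop := ∀ (n : Int) (t : Int) (m : Int) (p : Int), Dom_solution n t m p → Pre_solution n t m p → Spec_solution n t m p (solution n t m p)

-- ===== LEMMAS AND PROOFS =====

-- range(a, b, s) for a positive step s: cons and nil forms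
theorem pvRange_pos_cons {a b s : Int} (hs : 0 < s) (h : a < b) :
    PySem.List.pyRange a b s = a :: PySem.List.pyRange (a+s) b s := by
  rw [PySem.List.pyRange_of_pos _ _ hs, PySem.List.pyRange_of_pos _ _ hs]
  have h1 : ((b - a + s - 1) / s).toNat = ((b - (a+s) + s - 1) / s).toNat + 1 := by
    have hd : (b - a + s - 1) / s = (b - (a+s) + s - 1) / s + 1 := by
      have he : b - a + s - 1 = (b - (a+s) + s - 1) + 1 * s := by ring
      rw [he, Int.add_mul_ediv_right _ _ (by omega : s ≠ 0)]
    have h2 : 0 ≤ (b - (a+s) + s - 1) / s := by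
      by_cases hb : a + s < b
      · exact Int.ediv_nonneg (by omega) (by omega)
      · exact Int.ediv_nonneg (by omega) (by omega)
    omega
  rw [if_pos h, h1, List.range_succ_eq_map]
  simp only [List.map_map, List.map_cons, Nat.cast_zero, mul_zero, add_zero]
  refine congrArg₂ _ (by ring) ?_
  by_cases hb : a + s < b
  · rw [if_pos hb]
    apply List.map_congr_left
    intro k _
    simp [Function.comp]
    ring
  · rw [if_neg hb]
    have hz : (b - (a+s) + s - 1) / s = 0 := by
      apply Int.ediv_eq_zero_of_lt <;> omega
    rw [hz]; simp

theorem pvRange_pos_nil {a b s : Int} (hs : 0 < s) (h : b ≤ a) :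
    PySem.List.pyRange a b s = [] := by
  rw [PySem.List.pyRange_of_pos _ _ hs, if_neg (by omega)]
  simp

theorem pvRange_neg_nil {a b s : Int} (hs : s < 0) (h : a ≤ b) :
    PySem.List.pyRange a b s = [] := by
  simp only [PySem.List.pyRange, if_neg (by omega : ¬ s = 0), if_neg (by omega : ¬ 0 < s),
    if_neg (by omega : ¬ b < a)]
  simp

-- A's recursive conversion = reverse of B's least-significant-first digit list
theorem pvFuncA_eq_reverse (fuel : Nat) : ∀ (x nn : Int),
    funcA fuel x nn = (digitsB fuel x nn).reverse := by
  induction fuel with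
  | zero => intro x nn; rfl
  | succ fuel ih =>
    intro x nn
    simp only [funcA, digitsB]
    by_cases hq : PySem.Int.floordiv x nn = 0
    · simp [hq]
    · simp [hq, ih]

-- selFrom m p u pos: the digits of u (starting at global position pos) whose position is
-- ≥ p-1 and ≡ p-1 (mod m) — the uncapped stream B selects from
def pvSel (m p : Int) : List Char → Int → List Char
  | [], _ => []
  | c :: u, pos =>
    (if p-1 ≤ pos ∧ PySem.Int.mod (pos-(p-1)) m = 0 then [c] else []) ++ pvSel m p u (pos+1)

-- B's digit step folded over a block: answer prefix is stable once t digits are kept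
theorem pvStepB_stable (t m p : Int) (ch : List Char) : ∀ (st : List Char × Int),
    t ≤ (st.1.length : Int) → (ch.foldl (pvStepB t m p) st).1 = st.1 := by
  induction ch with
  | nil => intro st _; rfl
  | cons c ch ih =>
    intro st h
    simp only [List.foldl_cons]
    rw [show pvStepB t m p st c = (st.1, st.2 + 1) by
      simp only [pvStepB]
      rw [if_neg (by push_neg; intro _ _; omega)]]
    exact ih _ h

theorem pvFull_stable (t m p : Int) (chs : List (List Char)) : ∀ (st : List Char × Int),
    t ≤ (st.1.length : Int) →
    (chs.foldl (fun st ch => ch.foldl (pvStepB t m p) st) st).1 = st.1 := by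
  induction chs with
  | nil => intro st _; rfl
  | cons ch chs ih =>
    intro st h
    simp only [List.foldl_cons]
    have h1 := pvStepB_stable t m p ch st h
    rw [ih _ (by rw [h1]; exact h), h1]

-- B's outer break does not change the kept answer
theorem pvBreak_eq_full (t m p : Int) (chs : List (List Char)) : ∀ (st : List Char × Int),
    (chs.foldl (fun st ch => if t ≤ (st.1.length : Int) then st
                             else ch.foldl (pvStepB t m p) st) st).1
      = (chs.foldl (fun st ch => ch.foldl (pvStepB t m p) st) st).1 := by
  induction chs with
  | nil => intro st; rfl
  | cons ch chs ih =>
    intro st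
    simp only [List.foldl_cons]
    by_cases h : t ≤ (st.1.length : Int)
    · rw [if_pos h, ih st, pvFull_stable t m p chs st h,
        pvFull_stable t m p chs _ (by rw [pvStepB_stable t m p ch st h]; exact h),
        pvStepB_stable t m p ch st h]
    · rw [if_neg h]
      exact ih _

-- value of B's digit-step fold: what was kept, plus the capped selection from the rest
theorem pvStepB_fold (t m p : Int) (u : List Char) : ∀ (ans : List Char) (pos : Int),
    (u.foldl (pvStepB t m p) (ans, pos)).1
      = ans ++ (pvSel m p u pos).take ((t - ans.length).toNat) := by
  induction u with
  | nil => intro ans pos; simp [pvSel]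
  | cons c u ih =>
    intro ans pos
    simp only [List.foldl_cons, pvSel]
    by_cases hc : p-1 ≤ pos ∧ PySem.Int.mod (pos-(p-1)) m = 0
    · by_cases ht : (ans.length : Int) < t
      · rw [show pvStepB t m p (ans, pos) c = (ans ++ [c], pos + 1) by
          simp only [pvStepB]; rw [if_pos ⟨hc.1, hc.2, ht⟩]]
        rw [ih, if_pos hc]
        have hn : (t - (ans.length : Int)).toNat = (t - ((ans ++ [c]).length : Int)).toNat + 1 := by
          simp only [List.length_append, List.length_singleton]
          push_cast
          omega
        rw [hn, List.singleton_append, List.take_succ_cons, List.append_assoc,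
          List.singleton_append]
      · rw [show pvStepB t m p (ans, pos) c = (ans, pos + 1) by
          simp only [pvStepB]; rw [if_neg (by push_neg; intro _ _; omega)]]
        rw [ih]
        have hz : (t - ans.length).toNat = 0 := by omega
        simp [hz]
    · rw [show pvStepB t m p (ans, pos) c = (ans, pos + 1) by
        simp only [pvStepB]; rw [if_neg (by push_neg; intro h1 h2; exact absurd ⟨h1, h2⟩ hc)]]
      rw [ih, if_neg hc, List.nil_append]

-- shifting a positive Python index past a cons cell
theorem pvGetD_cons_shift (c : Char) (u : List Char) (j : Int) (d : Char) (h : 1 ≤ j) :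
    PySem.List.pyGetD (c :: u) j d = PySem.List.pyGetD u (j - 1) d := by
  unfold PySem.List.pyGetD PySem.List.pyGet? PySem.List.pyIdx?
  rw [if_pos (by omega : (0:Int) ≤ j), if_pos (by omega : (0:Int) ≤ j - 1)]
  by_cases hlt : j < ((c :: u).length : Int)
  · rw [if_pos hlt, if_pos (by simp only [List.length_cons] at hlt; omega)]
    have hj : j.toNat = (j-1).toNat + 1 := by omega
    rw [hj]
    simp only [Option.bind_some, List.getElem?_cons_succ]
  · rw [if_neg hlt, if_neg (by simp only [List.length_cons] at hlt ⊢; omega)]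
    rfl

-- the selected stream = the digits at range(p-1, p-1+len, m), read off the list
theorem pvSel_eq_range (m p : Int) (hm : 0 < m) (u : List Char) : ∀ (pos a : Int),
    pos ≤ a → m ∣ (a - (p-1)) → p-1 ≤ a → (a = p-1 ∨ a - pos < m) →
    pvSel m p u pos
      = (PySem.List.pyRange a (pos + u.length) m).map
          (fun i => PySem.List.pyGetD u (i - pos) '?') := by
  induction u with
  | nil =>
    intro pos a h1 _ _ _
    simp only [List.length_nil, Nat.cast_zero, add_zero, pvRange_pos_nil hm h1,
      List.map_nil, pvSel]
  | cons c u ih =>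
    intro pos a h1 h2 h3 h4
    have hlen : pos + ((c :: u).length : Int) = (pos + 1) + (u.length : Int) := by
      simp only [List.length_cons, Nat.cast_add, Nat.cast_one]
      ring
    by_cases hpa : pos = a
    · subst hpa
      have hcond : p-1 ≤ pos ∧ PySem.Int.mod (pos-(p-1)) m = 0 :=
        ⟨h3, by rw [PySem.Int.mod_eq_zero_iff_dvd]; exact h2⟩
      have hlt : pos < pos + ((c :: u).length : Int) := by
        simp only [List.length_cons, Nat.cast_add, Nat.cast_one]
        omega
      rw [pvRange_pos_cons hm hlt]
      simp only [pvSel, if_pos hcond, List.map_cons, sub_self, List.singleton_append]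
      congr 1
      · exact (PySem.List.pyGetD_zero_cons _ _ _).symm
      · rw [hlen, ih (pos+1) (pos+m) (by omega)
            (by rw [show pos + m - (p-1) = (pos-(p-1)) + m by ring]
                exact dvd_add h2 (dvd_refl m))
            (by omega) (Or.inr (by omega))]
        apply List.map_congr_left
        intro i hi
        have hmem := (PySem.List.mem_pyRange_iff_of_pos hm i).mp hi
        rw [pvGetD_cons_shift _ _ _ _ (by omega)]
        congr 1
        omega
    · have hposa : pos < a := by omega
      have hcond : ¬ (p-1 ≤ pos ∧ PySem.Int.mod (pos-(p-1)) m = 0) := by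
        rintro ⟨hc1, hc2⟩
        rw [PySem.Int.mod_eq_zero_iff_dvd] at hc2
        have hd : m ∣ (a - pos) := by
          have hd2 := dvd_sub h2 hc2
          rwa [show a - (p-1) - (pos - (p-1)) = a - pos by ring] at hd2
        have hle := Int.le_of_dvd (by omega) hd
        rcases h4 with h4 | h4 <;> omega
      simp only [pvSel, if_neg hcond, List.nil_append]
      rw [hlen, ih (pos+1) a (by omega) h2 h3 (h4.imp id (fun h => by omega))]
      apply List.map_congr_left
      intro i hi
      have hmem := (PySem.List.mem_pyRange_iff_of_pos hm i).mp hi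
      rw [pvGetD_cons_shift _ _ _ _ (by omega)]
      congr 1
      omega

-- value of A's selection fold
theorem pvFoldA (t : Int) (s : List Char) (idxs : List Int) : ∀ (ans : List Char) (cnt : Int),
    cnt = (ans.length : Int) →
    (idxs.foldl (fun (st : List Char × Int) i =>
        if t ≤ st.2 then st
        else (st.1 ++ [PySem.List.pyGetD s i '?'], st.2 + 1)) (ans, cnt)).1
      = ans ++ ((idxs.take ((t - cnt).toNat)).map (fun i => PySem.List.pyGetD s i '?')) := by
  induction idxs with
  | nil => intro ans cnt _; simp
  | cons i idxs ih =>
    intro ans cnt hc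
    simp only [List.foldl_cons]
    by_cases h : t ≤ cnt
    · rw [if_pos h, ih ans cnt hc]
      have hz : (t - cnt).toNat = 0 := by omega
      simp [hz]
    · rw [if_neg h, ih (ans ++ [PySem.List.pyGetD s i '?']) (cnt+1) (by simp [hc])]
      have hn : (t - cnt).toNat = (t - (cnt+1)).toNat + 1 := by omega
      simp [hn, List.take_succ_cons]

-- the main agreement, for any base: m ≥ 1, p ≥ 1
theorem pvMain (n t m p : Int) (hm : 1 ≤ m) (hp : 1 ≤ p) :
    solution n t m p = solution_alt n t m p := by
  have hm0 : (0:Int) < m := by omega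
  unfold solution solution_alt
  simp only [PySem.List.foldl_append_singleton_eq_map, List.nil_append, pvFuncA_eq_reverse]
  congr 1
  have hB : (List.foldl (fun (st : List Char × Int) (i : Int) =>
        if t ≤ (st.1.length : Int) then st
        else List.foldl (pvStepB t m p) st ((digitsB (i.natAbs + 1) i n).reverse)) ([], 0)
        (PySem.List.pyRange 0 (t*m) 1))
      = List.foldl (fun (st : List Char × Int) ch =>
        if t ≤ (st.1.length : Int) then st
        else List.foldl (pvStepB t m p) st ch) ([], 0)
        ((PySem.List.pyRange 0 (t*m) 1).map (fun i => (digitsB (i.natAbs + 1) i n).reverse)) := by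
    rw [List.foldl_map]
  rw [hB]
  rw [pvFoldA t _ _ [] 0 (by simp),
      pvBreak_eq_full t m p _ ([], 0),
      ← List.foldl_flatten,
      pvStepB_fold t m p _ [] 0,
      pvSel_eq_range m p hm0 _ 0 (p-1) (by omega) (by simp) (by omega) (Or.inl rfl)]
  simp only [List.nil_append, List.length_nil, Nat.cast_zero, sub_zero, zero_add]
  rw [List.map_take]

-- both sides are empty on the trivially-empty shapes with a negative stride
theorem pvNeg (n t m p : Int) (hm : m ≤ -1) (ht : 0 ≤ t) (hp : p ≤ 1) :
    solution n t m p = solution_alt n t m p := by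
  have htm : t * m ≤ 0 := mul_nonpos_of_nonneg_of_nonpos ht (by omega)
  have h0 : PySem.List.pyRange 0 (t*m) 1 = [] := pvRange_pos_nil one_pos (by omega)
  rw [solution, solution_alt, h0]
  simp only [List.foldl_nil, List.flatten_nil]
  rw [pvRange_neg_nil (by omega : m < 0) (by simp; omega)]
  rfl

-- with t ≤ 0 B's outer loop breaks immediately at every step
theorem pvBreakAll (n t m p : Int) (ht : t ≤ 0) (L : List Int) : ∀ (st : List Char × Int),
    (L.foldl (fun (st : List Char × Int) i =>
      if t ≤ (st.1.length : Int) then st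
      else ((digitsB (i.natAbs+1) i n).reverse).foldl (pvStepB t m p) st) st) = st := by
  induction L with
  | nil => intro st; rfl
  | cons i L ih =>
    intro st
    simp only [List.foldl_cons]
    rw [if_pos (by have := Int.natCast_nonneg st.1.length; omega)]
    exact ih st

-- with t ≤ 0 both selection loops break at once, whatever p and m are
theorem pvTriv (n t m p : Int) (ht : t ≤ 0) :
    solution n t m p = solution_alt n t m p := by
  rw [solution, solution_alt]
  simp only [pvBreakAll n t m p ht]
  rw [pvFoldA t _ _ [] 0 (by simp)]
  have hz : ((t - ((0:Int))).toNat) = 0 := by omega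
  simp only [List.length_nil, Nat.cast_zero, hz, List.take_zero, List.map_nil,
    List.nil_append]

-- ===== VERDICT (by name: the statement is the Claim_ definition above) =====
theorem solution_spec : Claim_equal_solution := by
  intro n t m p _ hpre
  unfold Spec_solution
  rcases hpre with ⟨-, ⟨ht, -⟩ | ⟨ht, hm, hp⟩ | ⟨ht, hm, hp⟩⟩
  · exact pvTriv n t m p ht
  · exact pvMain n t m p hm hp
  · exact pvNeg n t m p hm (by omega) hp
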